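-- pv_equiv track=rewrite | github.com/sangzzz/AlgorithmsOnStrings | week3&4_suffix_array_suffix_tree/02 - suffix_array_long/suffix_array_long.py | compute_classes
-- ===== SOURCE A (Python) =====
-- def compute_classes(classes, order, L):
--     newClasses = [None] * len(order)
--     newClasses[order[0]] = 0
--
--     for i in range(1, len(order)):
--         cur = order[i]
--         prev = order[i-1]
--
--         mid = (cur + L) % len(order)
--         midPrev = (prev + L) % len(order)
--
--         if (classes[cur] != classes[prev]) or (classes[mid] != classes[midPrev]):
--             newClasses[cur] = newClasses[prev] + 1
--         else:
--             newClasses[cur] = newClasses[prev]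
--
--     return newClasses
-- ===== SOURCE B (Python) =====
-- # Divide-and-conquer relabelling: recursively label each half of the order
-- # sequence, then merge by offsetting the right half; finally scatter by order[i].
-- def compute_classes(classes, order, L):
--     n = len(order)
--     if n == 0:
--         return []
--
--     def key(o):
--         return (classes[o], classes[(o + L) % n])
--
--     def labels(lo, hi):
--         if hi - lo == 1:
--             return [0]
--         mid = (lo + hi) // 2
--         left = labels(lo, mid)
--         right = labels(mid, hi)
--         off = left[-1] + (1 if key(order[mid]) != key(order[mid - 1]) else 0)
--         return left + [off + v for v in right]
--
--     newClasses = [None] * n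
--     for o, v in zip(order, labels(0, n)):
--         newClasses[o] = v
--     return newClasses
-- ===== Notes on version B (the rewrite author's own statement) =====
-- stated objective: alternative
-- what changed: Replaces A's left-to-right scan that compares each order element with its predecessor and reads the previous class back out of the output array by a divide-and-conquer labelling: recursively label the two halves of the order sequence, merge by adding an offset (left's last label plus the boundary indicator at the split) to the right half, then scatter labels to positions order[i].
-- outside the precondition, e.g. on compute_classes([2, 0], [0, 1, 0, 1], -1): A returns [2, 3, None, None], B raises IndexError
import Mathlib
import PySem

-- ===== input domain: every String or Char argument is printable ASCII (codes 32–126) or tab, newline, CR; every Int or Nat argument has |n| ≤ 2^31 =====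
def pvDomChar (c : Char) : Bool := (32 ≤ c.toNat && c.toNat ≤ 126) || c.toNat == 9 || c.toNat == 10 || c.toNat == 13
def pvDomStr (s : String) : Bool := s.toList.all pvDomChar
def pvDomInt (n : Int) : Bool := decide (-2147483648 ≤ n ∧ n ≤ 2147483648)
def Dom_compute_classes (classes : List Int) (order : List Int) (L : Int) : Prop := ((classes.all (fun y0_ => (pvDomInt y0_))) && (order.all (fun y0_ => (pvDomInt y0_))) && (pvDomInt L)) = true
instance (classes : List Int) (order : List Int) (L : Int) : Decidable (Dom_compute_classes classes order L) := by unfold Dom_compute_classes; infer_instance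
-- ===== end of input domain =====

-- B relabels the order sequence by divide and conquer (label each half recursively,
-- merge with an offset at the split, then scatter by order[i]) instead of A's single
-- left-to-right scan that reads previous classes back out of the output array.

-- ===== PORT A =====
def compute_classes (classes : List Int) (order : List Int) (L : Int) : List (Option Int) :=
  let n : Int := (order.length : Int)
  let start : List (Option Int) :=
    PySem.List.pySetD (List.replicate order.length (none : Option Int))
      (PySem.List.pyGetD order 0 0) (some 0)
  (PySem.List.pyRange 1 n 1).foldl (fun nc i =>
    let cur := PySem.List.pyGetD order i 0
    let prev := PySem.List.pyGetD order (i - 1) 0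
    let mid := PySem.Int.mod (cur + L) n
    let midPrev := PySem.Int.mod (prev + L) n
    if PySem.List.pyGetD classes cur 0 ≠ PySem.List.pyGetD classes prev 0 ∨
       PySem.List.pyGetD classes mid 0 ≠ PySem.List.pyGetD classes midPrev 0 then
      PySem.List.pySetD nc cur ((PySem.List.pyGetD nc prev none).map (· + 1))
    else
      PySem.List.pySetD nc cur (PySem.List.pyGetD nc prev none)) start

-- ===== PORT B =====
-- key(o) = (classes[o], classes[(o + L) % n])  (total via pyGetD; under Pre_ all reads are in range)
def pvKey (classes : List Int) (order : List Int) (L : Int) (o : Int) : Int × Int :=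
  (PySem.List.pyGetD classes o 0,
   PySem.List.pyGetD classes (PySem.Int.mod (o + L) (order.length : Int)) 0)

-- labels(lo, hi) of Source B; the base case 'hi ≤ lo + 1' is A's 'hi - lo == 1' plus a
-- totality guard (Python only ever calls it with lo < hi)
def pvLabels (classes : List Int) (order : List Int) (L : Int) (lo hi : Nat) : List Int :=
  if hi ≤ lo + 1 then [(0 : Int)]
  else
    let mid := (lo + hi) / 2
    let left := pvLabels classes order L lo mid
    let right := pvLabels classes order L mid hi
    let off := PySem.List.pyGetD left (-1) 0 +
      (if pvKey classes order L (PySem.List.pyGetD order (mid : Int) 0) ≠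
          pvKey classes order L (PySem.List.pyGetD order ((mid : Int) - 1) 0) then 1 else 0)
    left ++ right.map (fun v => off + v)
termination_by hi - lo
decreasing_by all_goals omega

def compute_classes_alt (classes : List Int) (order : List Int) (L : Int) : List (Option Int) :=
  let n := order.length
  if n = 0 then []
  else
    (order.zip (pvLabels classes order L 0 n)).foldl
      (fun nc pv => PySem.List.pySetD nc pv.1 (some pv.2))
      (List.replicate n (none : Option Int))

-- ===== PRECONDITION & SPEC =====
-- Pre_ excludes the inputs on which A raises (empty order: IndexError on order[0];
-- order entries or their (o+L)%n companions out of indexing range) and, because A's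
-- 'or' short-circuits while B's grouping key always reads classes[(o+L)%n], also the
-- inputs where only that second read is out of range: there A still returns but B's
-- own algorithm raises IndexError.
def Pre_compute_classes (classes : List Int) (order : List Int) (L : Int) : Prop :=
  order ≠ [] ∧
  (∀ o ∈ order, -(order.length : Int) ≤ o ∧ o < (order.length : Int)) ∧
  (1 < order.length → ∀ o ∈ order,
    (-(classes.length : Int) ≤ o ∧ o < (classes.length : Int)) ∧
    PySem.Int.mod (o + L) (order.length : Int) < (classes.length : Int))
instance (classes : List Int) (order : List Int) (L : Int) : Decidable (Pre_compute_classes classes order L) := by unfold Pre_compute_classes; infer_instance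
def pvWitness_compute_classes : List Int × List Int × Int := ([0, 1], [1, 0], 1)

def Spec_compute_classes (classes : List Int) (order : List Int) (L : Int) (out : List (Option Int)) : Prop := out = compute_classes_alt classes order L
instance (classes : List Int) (order : List Int) (L : Int) (out : List (Option Int)) : Decidable (Spec_compute_classes classes order L out) := by unfold Spec_compute_classes; infer_instance

-- ===== CLAIM (what is proved, stated in full; the proofs are below) =====
def Claim_equal_compute_classes : Prop := ∀ (classes : List Int) (order : List Int) (L : Int), Dom_compute_classes classes order L → Pre_compute_classes classes order L → Spec_compute_classes classes order L (compute_classes classes order L)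

-- ===== LEMMAS AND PROOFS =====

-- the branch condition A tests at loop index i
abbrev pvCond (classes : List Int) (order : List Int) (L : Int) (i : Int) : Prop :=
  PySem.List.pyGetD classes (PySem.List.pyGetD order i 0) 0 ≠
    PySem.List.pyGetD classes (PySem.List.pyGetD order (i - 1) 0) 0 ∨
  PySem.List.pyGetD classes (PySem.Int.mod (PySem.List.pyGetD order i 0 + L) (order.length : Int)) 0 ≠
    PySem.List.pyGetD classes (PySem.Int.mod (PySem.List.pyGetD order (i - 1) 0 + L) (order.length : Int)) 0

-- the class value written for order[k]
def pvVal (classes : List Int) (order : List Int) (L : Int) : Nat → Int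
  | 0 => 0
  | k + 1 => pvVal classes order L k + (if pvCond classes order L ((k : Int) + 1) then 1 else 0)

-- the common result: scatter pvVal k to position order[k] for k < j
def pvScat (classes : List Int) (order : List Int) (L : Int) (j : Nat) : List (Option Int) :=
  (List.range j).foldl
    (fun nc k => PySem.List.pySetD nc (order.getD k 0) (some (pvVal classes order L k)))
    (List.replicate order.length (none : Option Int))

theorem pv_getD_setD_self {α : Type} (xs : List α) (i : Int) (v d : α)
    (h0 : -(xs.length : Int) ≤ i) (h1 : i < (xs.length : Int)) :
    PySem.List.pyGetD (PySem.List.pySetD xs i v) i d = v := by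
  simp only [PySem.List.pyGetD, PySem.List.pyGet?, PySem.List.pySetD, PySem.List.pySet?,
    PySem.List.pyIdx?]
  by_cases hp : 0 ≤ i
  · have hlt : i.toNat < xs.length := by omega
    simp [hp, h1, hlt]
  · have hk : xs.length - (-i).toNat < xs.length := by omega
    simp [hp, h0, hk]

theorem pvScat_length (classes : List Int) (order : List Int) (L : Int) (j : Nat) :
    (pvScat classes order L j).length = order.length := by
  induction j with
  | zero => simp [pvScat]
  | succ j ih =>
    simp only [pvScat, List.range_succ, List.foldl_append, List.foldl_cons, List.foldl_nil]
    rw [PySem.List.length_pySetD]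
    exact ih

theorem pvScat_succ (classes : List Int) (order : List Int) (L : Int) (j : Nat) :
    pvScat classes order L (j + 1) =
      PySem.List.pySetD (pvScat classes order L j) (order.getD j 0)
        (some (pvVal classes order L j)) := by
  simp only [pvScat, List.range_succ, List.foldl_append, List.foldl_cons, List.foldl_nil]

theorem pv_mem_getD (order : List Int) (j : Nat) (hj : j < order.length) :
    order.getD j 0 ∈ order := by
  rw [List.getD_eq_getElem order 0 hj]
  exact List.getElem_mem hj

theorem pvScat_readback (classes : List Int) (order : List Int) (L : Int) (j : Nat)
    (hj : j < order.length)
    (hin : ∀ o ∈ order, -(order.length : Int) ≤ o ∧ o < (order.length : Int)) :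
    PySem.List.pyGetD (pvScat classes order L (j + 1)) (order.getD j 0) none
      = some (pvVal classes order L j) := by
  rw [pvScat_succ]
  obtain ⟨hl, hr⟩ := hin _ (pv_mem_getD order j hj)
  have hlen := pvScat_length classes order L j
  exact pv_getD_setD_self _ _ _ _ (by rw [hlen]; exact hl) (by rw [hlen]; exact hr)

-- A's loop reaches pvScat
theorem pvA_inv (classes : List Int) (order : List Int) (L : Int)
    (hin : ∀ o ∈ order, -(order.length : Int) ≤ o ∧ o < (order.length : Int)) :
    ∀ j : Nat, 1 ≤ j → j ≤ order.length →
    (PySem.List.pyRange 1 (j : Int) 1).foldl (fun nc i =>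
      let cur := PySem.List.pyGetD order i 0
      let prev := PySem.List.pyGetD order (i - 1) 0
      let mid := PySem.Int.mod (cur + L) (order.length : Int)
      let midPrev := PySem.Int.mod (prev + L) (order.length : Int)
      if PySem.List.pyGetD classes cur 0 ≠ PySem.List.pyGetD classes prev 0 ∨
         PySem.List.pyGetD classes mid 0 ≠ PySem.List.pyGetD classes midPrev 0 then
        PySem.List.pySetD nc cur ((PySem.List.pyGetD nc prev none).map (· + 1))
      else
        PySem.List.pySetD nc cur (PySem.List.pyGetD nc prev none))
      (PySem.List.pySetD (List.replicate order.length (none : Option Int))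
        (PySem.List.pyGetD order 0 0) (some 0))
      = pvScat classes order L j := by
  intro j
  induction j with
  | zero => intro h; omega
  | succ j ih =>
    intro _ hle
    by_cases hj1 : j = 0
    · subst hj1
      rw [show ((1 : Nat) : Int) = 1 by norm_num, PySem.List.pyRange_one_eq_nil le_rfl]
      simp only [List.foldl_nil, pvScat]
      rw [PySem.List.pyGetD_zero]
      rfl
    · have h1j : 1 ≤ j := by omega
      have hjn : j < order.length := by omega
      rw [show ((j + 1 : Nat) : Int) = (j : Int) + 1 by push_cast; ring,
        PySem.List.pyRange_one_succ_right (by exact_mod_cast h1j), List.foldl_append,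
        ih h1j (by omega), List.foldl_cons, List.foldl_nil]
      have hcur : PySem.List.pyGetD order (j : Int) 0 = order.getD j 0 :=
        PySem.List.pyGetD_natCast order j 0
      have hprevc : (j : Int) - 1 = ((j - 1 : Nat) : Int) := by omega
      have hprev : PySem.List.pyGetD order ((j : Int) - 1) 0 = order.getD (j - 1) 0 := by
        rw [hprevc]; exact PySem.List.pyGetD_natCast order (j - 1) 0
      have hrb : PySem.List.pyGetD (pvScat classes order L j) (order.getD (j - 1) 0) none
          = some (pvVal classes order L (j - 1)) := by
        have := pvScat_readback classes order L (j - 1) (by omega) hin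
        rwa [show j - 1 + 1 = j by omega] at this
      have hval : pvVal classes order L j =
          pvVal classes order L (j - 1) +
            (if pvCond classes order L ((j : Int)) then 1 else 0) := by
        conv_lhs => rw [show j = (j - 1) + 1 by omega]
        rw [pvVal]
        rw [show (((j - 1 : Nat)) : Int) + 1 = (j : Int) by omega]
      rw [pvScat_succ]
      by_cases hc : pvCond classes order L ((j : Int))
      · rw [if_pos (show _ from by unfold pvCond at hc; exact hc)]
        rw [hcur, hprev, hrb, hval, if_pos hc]
        rfl
      · rw [if_neg (show _ from by unfold pvCond at hc; exact hc)]
        rw [hcur, hprev, hrb, hval, if_neg hc]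
        simp

-- the key-pair comparison of B is A's branch condition
theorem pvKey_ne_iff (classes : List Int) (order : List Int) (L : Int) (j : Nat) :
    (pvKey classes order L (PySem.List.pyGetD order (j : Int) 0) ≠
       pvKey classes order L (PySem.List.pyGetD order ((j : Int) - 1) 0))
      ↔ pvCond classes order L (j : Int) := by
  simp only [pvKey, pvCond, Ne, Prod.mk.injEq, not_and_or]

-- B's recursive labels compute the running boundary count relative to lo
theorem pvLabels_eq (classes : List Int) (order : List Int) (L : Int) :
    ∀ d lo hi, hi - lo = d → lo < hi →
    pvLabels classes order L lo hi =
      (List.range (hi - lo)).map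
        (fun k => pvVal classes order L (lo + k) - pvVal classes order L lo) := by
  intro d
  induction d using Nat.strong_induction_on with
  | _ d ih =>
    intro lo hi hd hlt
    rw [pvLabels]
    by_cases hb : hi ≤ lo + 1
    · have : hi = lo + 1 := by omega
      subst this
      simp
    · rw [if_neg hb]
      dsimp only
      have hmid1 : lo < (lo + hi) / 2 := by omega
      have hmid2 : (lo + hi) / 2 < hi := by omega
      set mid := (lo + hi) / 2 with hm
      have hL := ih (mid - lo) (by omega) lo mid rfl hmid1
      have hR := ih (hi - mid) (by omega) mid hi rfl hmid2
      rw [hL, hR]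
      -- the last element of the left labels
      have hlast : PySem.List.pyGetD
          ((List.range (mid - lo)).map
            (fun k => pvVal classes order L (lo + k) - pvVal classes order L lo)) (-1) 0
          = pvVal classes order L (mid - 1) - pvVal classes order L lo := by
        have hne : ((List.range (mid - lo)).map
            (fun k => pvVal classes order L (lo + k) - pvVal classes order L lo)) ≠ [] := by
          simp; omega
        rw [PySem.List.pyGetD_neg_one _ _ hne, List.getLast_eq_getElem]
        simp only [List.getElem_map, List.getElem_range, List.length_map, List.length_range]
        congr 2
        omega
      rw [hlast]
      have hcnd := pvKey_ne_iff classes order L mid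
      have hvm : pvVal classes order L (mid - 1) - pvVal classes order L lo +
          (if pvKey classes order L (PySem.List.pyGetD order (mid : Int) 0) ≠
              pvKey classes order L (PySem.List.pyGetD order ((mid : Int) - 1) 0)
           then (1 : Int) else 0)
          = pvVal classes order L mid - pvVal classes order L lo := by
        have hstep : pvVal classes order L mid =
            pvVal classes order L (mid - 1) +
              (if pvCond classes order L ((mid : Int)) then 1 else 0) := by
          conv_lhs => rw [show mid = (mid - 1) + 1 by omega]
          rw [pvVal, show (((mid - 1 : Nat)) : Int) + 1 = (mid : Int) by omega]
        rw [if_congr hcnd rfl rfl, hstep]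
        ring
      rw [hvm]
      rw [show hi - lo = (mid - lo) + (hi - mid) by omega, List.range_add, List.map_append,
        List.map_map]
      congr 1
      rw [List.map_map]
      apply List.map_congr_left
      intro k _
      simp only [Function.comp_apply]
      rw [show lo + (mid - lo + k) = mid + k by omega]
      ring

theorem pv_zip_scatter : ∀ (xs : List Int) (g : Nat → Int) (init : List (Option Int)),
    (xs.zip ((List.range xs.length).map g)).foldl
        (fun nc pv => PySem.List.pySetD nc pv.1 (some pv.2)) init
      = (List.range xs.length).foldl
        (fun nc k => PySem.List.pySetD nc (xs.getD k 0) (some (g k))) init := by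
  intro xs
  induction xs with
  | nil => intro g init; simp
  | cons x xs ih =>
    intro g init
    rw [List.length_cons, List.range_succ_eq_map]
    simp only [List.map_cons, List.map_map, List.zip_cons_cons, List.foldl_cons,
      List.foldl_map]
    have hmap : List.map (g ∘ Nat.succ) (List.range xs.length)
        = List.map (fun k => g (k + 1)) (List.range xs.length) := by
      apply List.map_congr_left
      intro k _
      rfl
    rw [hmap, ih (fun k => g (k + 1)) (PySem.List.pySetD init x (some (g 0)))]
    simp only [Nat.succ_eq_add_one, List.getD_cons_succ, List.getD_cons_zero]

theorem pvB_eq (classes : List Int) (order : List Int) (L : Int) (hne : order ≠ []) :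
    compute_classes_alt classes order L = pvScat classes order L order.length := by
  have hn1 : 0 < order.length := List.length_pos_of_ne_nil hne
  unfold compute_classes_alt
  rw [if_neg (by omega)]
  have hlab : pvLabels classes order L 0 order.length
      = (List.range order.length).map (pvVal classes order L) := by
    rw [pvLabels_eq classes order L order.length 0 order.length (by omega) hn1]
    apply List.map_congr_left
    intro k _
    simp [pvVal]
  rw [hlab, pv_zip_scatter order (pvVal classes order L)]
  rfl

-- ===== VERDICT (by name: the statement is the Claim_ definition above) =====
theorem compute_classes_spec : Claim_equal_compute_classes := by
  intro classes order L _ hpre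
  obtain ⟨hne, hin, _⟩ := hpre
  unfold Spec_compute_classes
  have hn1 : 1 ≤ order.length := List.length_pos_of_ne_nil hne
  have hA := pvA_inv classes order L hin order.length hn1 le_rfl
  rw [pvB_eq classes order L hne]
  unfold compute_classes
  exact hA
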